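-- pv_equiv track=rewrite | github.com/blinkdagger182/document-ai-fastapi | workers/ensemble_merger.py | _is_generic_label
-- ===== SOURCE A (Python) =====
-- def _is_generic_label(label: str) -> bool:
--     """
--     Check if a label is generic (auto-generated).
--
--     Args:
--         label: Label string to check
--
--     Returns:
--         True if label appears to be auto-generated
--     """
--     if not label:
--         return True
--
--     generic_patterns = [
--         "Field ",
--         "Text Field ",
--         "Checkbox ",
--         "Signature ",
--         "Widget ",
--         "XObject Field ",
--     ]
--
--     for pattern in generic_patterns:
--         if label.startswith(pattern):
--             # Check if followed by a number
--             suffix = label[len(pattern):]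
--             if suffix.isdigit():
--                 return True
--
--     return False
-- ===== SOURCE B (Python) =====
-- _GENERIC_STEMS = {
--     "Field",
--     "Text Field",
--     "Checkbox",
--     "Signature",
--     "Widget",
--     "XObject Field",
-- }
--
--
-- def _is_generic_label(label: str) -> bool:
--     if not label:
--         return True
--     last_space = -1
--     for i, c in enumerate(label):
--         if c == ' ':
--             last_space = i
--     if last_space < 0:
--         return False
--     return label[last_space + 1:].isdigit() and label[:last_space] in _GENERIC_STEMS
-- ===== Notes on version B (the rewrite author's own statement) =====
-- stated objective: alternative
-- what changed: Replaces the per-pattern startswith+isdigit loop by one forward scan recording the index of the last space, then a single split there: the suffix must be digits and the stem (without the separator space) must be in a set.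
import Mathlib
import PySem

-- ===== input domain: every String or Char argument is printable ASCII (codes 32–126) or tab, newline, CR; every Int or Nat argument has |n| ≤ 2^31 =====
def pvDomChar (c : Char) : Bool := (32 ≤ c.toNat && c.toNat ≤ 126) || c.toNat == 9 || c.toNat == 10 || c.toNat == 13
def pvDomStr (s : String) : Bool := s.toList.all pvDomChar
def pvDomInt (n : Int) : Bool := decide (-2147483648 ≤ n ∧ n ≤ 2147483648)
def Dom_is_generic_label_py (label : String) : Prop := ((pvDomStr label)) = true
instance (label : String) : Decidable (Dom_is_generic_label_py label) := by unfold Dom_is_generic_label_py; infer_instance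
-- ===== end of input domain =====

-- B replaces A's per-pattern startswith loop by one forward scan recording the last
-- space index, then a single split there and a set lookup of the stem (alternative decomposition).


-- ===== PORT A =====
def pvPatternsA : List (List Char) :=
  ["Field ".toList, "Text Field ".toList, "Checkbox ".toList,
   "Signature ".toList, "Widget ".toList, "XObject Field ".toList]

-- the for-loop with early 'return True' is the List.any over the pattern list
def is_generic_label_py (label : String) : Bool :=
  let cs := label.toList
  if cs.isEmpty then true
  else
    pvPatternsA.any (fun p =>
      PySem.Chars.startswith cs p &&
        PySem.Chars.strIsdigit (PySem.Chars.slice cs (some (p.length : Int)) none))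

-- ===== PORT B =====
def pvStemsB : List (List Char) :=
  ["Field".toList, "Text Field".toList, "Checkbox".toList,
   "Signature".toList, "Widget".toList, "XObject Field".toList]

-- the 'for i, c in enumerate(label)' loop updating last_space is this foldl
def pvLastSpace (cs : List Char) : Int :=
  (PySem.List.enumerate cs 0).foldl (fun last ic => if ic.2 = ' ' then ic.1 else last) (-1)

def is_generic_label_py_alt (label : String) : Bool :=
  let cs := label.toList
  if cs.isEmpty then true
  else
    let ls := pvLastSpace cs
    if ls < 0 then false
    else
      PySem.Chars.strIsdigit (PySem.Chars.slice cs (some (ls + 1)) none) &&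
        pvStemsB.contains (PySem.Chars.slice cs none (some ls))

-- ===== PRECONDITION & SPEC =====
def Spec_is_generic_label_py (label : String) (out : Bool) : Prop := out = is_generic_label_py_alt label
instance (label : String) (out : Bool) : Decidable (Spec_is_generic_label_py label out) := by unfold Spec_is_generic_label_py; infer_instance

-- ===== CLAIM (what is proved, stated in full; the proofs are below) =====
def Claim_equal_is_generic_label_py : Prop := ∀ (label : String), Dom_is_generic_label_py label → Spec_is_generic_label_py label (is_generic_label_py label)

-- ===== LEMMAS AND PROOFS =====

lemma pvLS_nil : pvLastSpace [] = -1 := rfl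

lemma pvLS_snoc (u : List Char) (c : Char) :
    pvLastSpace (u ++ [c]) = if c = ' ' then (u.length : Int) else pvLastSpace u := by
  unfold pvLastSpace
  rw [PySem.List.enumerate_append, List.foldl_append]
  simp [PySem.List.enumerate_cons, PySem.List.enumerate_nil]

-- the loop result at the last space: cs = u ++ ' ' :: v with no space in v
lemma pvLS_last (u v : List Char) (hv : ' ' ∉ v) :
    pvLastSpace (u ++ ' ' :: v) = (u.length : Int) := by
  induction v using List.reverseRecOn with
  | nil => rw [show u ++ [' '] = u ++ [' '] from rfl, pvLS_snoc, if_pos rfl]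
  | append_singleton w c ih =>
      have hc : c ≠ ' ' := by intro h; exact hv (by simp [h])
      have hw : ' ' ∉ w := fun h => hv (by simp [h])
      rw [show u ++ ' ' :: (w ++ [c]) = (u ++ ' ' :: w) ++ [c] by simp, pvLS_snoc,
        if_neg hc, ih hw]

-- a nonnegative loop result exhibits the last space
lemma pvLS_decomp (cs : List Char) (h : 0 ≤ pvLastSpace cs) :
    ∃ u v, cs = u ++ ' ' :: v ∧ (u.length : Int) = pvLastSpace cs ∧ ' ' ∉ v := by
  induction cs using List.reverseRecOn with
  | nil => rw [pvLS_nil] at h; omega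
  | append_singleton w c ih =>
      rw [pvLS_snoc] at h ⊢
      by_cases hc : c = ' '
      · exact ⟨w, [], by simp [hc], by simp [hc], by simp⟩
      · rw [if_neg hc] at h ⊢
        obtain ⟨u, v, hw, hl, hv⟩ := ih h
        exact ⟨u, v ++ [c], by simp [hw], hl, by
          intro hmem
          rcases List.mem_append.mp hmem with h1 | h1
          · exact hv h1
          · exact hc (List.mem_singleton.mp h1).symm⟩

-- A's per-pattern test, characterised: the label splits as stem ++ ' ' :: digits
lemma pv_condA_iff (cs s : List Char) :
    (PySem.Chars.startswith cs (s ++ [' ']) &&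
        PySem.Chars.strIsdigit
          (PySem.Chars.slice cs (some ((s ++ [' ']).length : Int)) none)) = true
      ↔ ∃ d, cs = s ++ ' ' :: d ∧ PySem.Chars.strIsdigit d = true := by
  rw [Bool.and_eq_true, PySem.Chars.startswith_iff, PySem.Chars.slice_eq_listSlice,
    PySem.List.slice_from _ (by positivity)]
  simp only [Int.toNat_natCast]
  constructor
  · rintro ⟨⟨t, rfl⟩, hd⟩
    exact ⟨t, by simp, by simpa [List.drop_left] using hd⟩
  · rintro ⟨d, rfl, hd⟩
    refine ⟨⟨d, by simp⟩, ?_⟩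
    have : (s ++ ' ' :: d).drop (s ++ [' ']).length = d := by
      rw [show s ++ ' ' :: d = (s ++ [' ']) ++ d by simp, List.drop_left]
    rw [this]; exact hd

-- every A pattern is a B stem plus a trailing space
lemma pv_patterns_map : pvPatternsA = pvStemsB.map (fun s => s ++ [' ']) := by decide

-- a digit is never a space
lemma pv_digits_no_space (d : List Char) (hd : PySem.Chars.strIsdigit d = true) : ' ' ∉ d := by
  intro hmem
  unfold PySem.Chars.strIsdigit at hd
  rw [Bool.and_eq_true, List.all_eq_true] at hd
  have := hd.2 ' ' hmem
  simp [PySem.Chars.isdigit] at this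

-- ===== VERDICT (by name: the statement is the Claim_ definition above) =====
theorem is_generic_label_py_spec : Claim_equal_is_generic_label_py := by
  intro label _
  unfold Spec_is_generic_label_py is_generic_label_py is_generic_label_py_alt
  cases hE : label.toList.isEmpty
  · simp only [hE, Bool.false_eq_true, if_false]
    generalize label.toList = cs at *
    by_cases hex : ∃ s ∈ pvStemsB, ∃ d, cs = s ++ ' ' :: d ∧ PySem.Chars.strIsdigit d = true
    · obtain ⟨s, hs, d, rfl, hd⟩ := hex
      have hA : pvPatternsA.any (fun p =>
          PySem.Chars.startswith (s ++ ' ' :: d) p &&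
            PySem.Chars.strIsdigit
              (PySem.Chars.slice (s ++ ' ' :: d) (some (p.length : Int)) none)) = true := by
        rw [List.any_eq_true]
        exact ⟨s ++ [' '], by rw [pv_patterns_map]; exact List.mem_map_of_mem hs,
          (pv_condA_iff _ s).mpr ⟨d, rfl, hd⟩⟩
      rw [hA]
      have hls : pvLastSpace (s ++ ' ' :: d) = (s.length : Int) :=
        pvLS_last s d (pv_digits_no_space d hd)
      rw [hls, if_neg (by omega)]
      have hsuf : PySem.Chars.slice (s ++ ' ' :: d) (some ((s.length : Int) + 1)) none = d := by
        rw [PySem.Chars.slice_eq_listSlice, PySem.List.slice_from _ (by positivity),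
          show ((s.length : Int) + 1).toNat = (s ++ [' ']).length by simp,
          show s ++ ' ' :: d = (s ++ [' ']) ++ d by simp, List.drop_left]
      have hpre : PySem.Chars.slice (s ++ ' ' :: d) none (some (s.length : Int)) = s := by
        rw [PySem.Chars.slice_eq_listSlice, PySem.List.slice_to _ (by positivity),
          Int.toNat_natCast, List.take_left']
        rfl
      rw [hsuf, hpre, hd, Bool.true_and, List.contains_iff_mem.mpr hs]
    · have hA : pvPatternsA.any (fun p =>
          PySem.Chars.startswith cs p &&
            PySem.Chars.strIsdigit
              (PySem.Chars.slice cs (some (p.length : Int)) none)) = false := by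
        rw [List.any_eq_false]
        intro p hp
        rw [pv_patterns_map, List.mem_map] at hp
        obtain ⟨s, hs, rfl⟩ := hp
        rw [Bool.not_eq_true, ← Bool.not_eq_true, pv_condA_iff]
        rintro ⟨d, rfl, hd⟩
        exact hex ⟨s, hs, d, rfl, hd⟩
      rw [hA]
      by_cases hls : pvLastSpace cs < 0
      · rw [if_pos hls]
      · rw [if_neg hls]
        obtain ⟨u, v, rfl, hl, hv⟩ := pvLS_decomp cs (by omega)
        rw [← hl]
        symm
        rw [Bool.and_eq_false_iff]
        by_cases hdv : PySem.Chars.strIsdigit v = true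
        · right
          have hpre : PySem.Chars.slice (u ++ ' ' :: v) none (some (u.length : Int)) = u := by
            rw [PySem.Chars.slice_eq_listSlice, PySem.List.slice_to _ (by positivity),
              Int.toNat_natCast, List.take_left']
            rfl
          rw [hpre, ← Bool.not_eq_true, List.contains_iff_mem]
          intro hu
          exact hex ⟨u, hu, v, rfl, hdv⟩
        · left
          have hsuf : PySem.Chars.slice (u ++ ' ' :: v) (some ((u.length : Int) + 1)) none = v := by
            rw [PySem.Chars.slice_eq_listSlice, PySem.List.slice_from _ (by positivity),
              show ((u.length : Int) + 1).toNat = (u ++ [' ']).length by simp,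
              show u ++ ' ' :: v = (u ++ [' ']) ++ v by simp, List.drop_left]
          rw [hsuf]
          exact Bool.not_eq_true _ ▸ hdv
  · simp [hE]
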